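-- pv_equiv track=rewrite | github.com/sumnicky99/pracss | solution.py | solution
-- ===== SOURCE A (Python) =====
-- def solution(A, F, M):
--     num_known_rolls = len(A)
--     sum_known_rolls = sum(A)
--     total_rolls = num_known_rolls + F
--     required_sum = total_rolls * M - sum_known_rolls
--
--     # Check if the required sum is possible
--     if required_sum < F or required_sum > 6 * F:
--         return [0]
--
--     # Generate the possible results for the missing rolls
--     missing_rolls = []
--     remaining_sum = required_sum
--
--     for _ in range(F):
--         # Calculate the maximum we can assign to the current roll
--         roll = min(6, remaining_sum - (F - len(missing_rolls) - 1))
--         missing_rolls.append(roll)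
--         remaining_sum -= roll
--
--     return missing_rolls
-- ===== SOURCE B (Python) =====
-- def solution(A, F, M):
--     required_sum = (len(A) + F) * M - sum(A)
--     if required_sum < F or required_sum > 6 * F:
--         return [0]
--     excess = required_sum - F
--     full, rem = divmod(excess, 5)
--     out = [6] * full
--     if rem:
--         out.append(1 + rem)
--     out += [1] * (F - len(out))
--     return out
-- ===== Notes on version B (the rewrite author's own statement) =====
-- stated objective: simpler
-- what changed: Replaces the per-slot greedy loop (which recomputes min(6, remaining - slots_left) and mutates a running remainder for each of the F dice) with a closed-form construction: divmod(excess, 5) gives the count of 6s, one die of 1+remainder, and 1s for the rest.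
import Mathlib
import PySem

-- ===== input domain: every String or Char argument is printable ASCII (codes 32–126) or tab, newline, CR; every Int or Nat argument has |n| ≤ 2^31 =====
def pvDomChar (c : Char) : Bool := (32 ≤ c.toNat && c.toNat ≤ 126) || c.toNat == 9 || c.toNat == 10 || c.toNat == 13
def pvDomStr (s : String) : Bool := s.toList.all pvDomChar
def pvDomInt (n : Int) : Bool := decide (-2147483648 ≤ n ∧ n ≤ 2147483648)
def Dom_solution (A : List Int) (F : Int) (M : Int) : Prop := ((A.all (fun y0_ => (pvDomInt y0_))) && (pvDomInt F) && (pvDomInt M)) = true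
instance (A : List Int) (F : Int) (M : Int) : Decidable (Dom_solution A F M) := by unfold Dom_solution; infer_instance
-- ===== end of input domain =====

-- B replaces A's slot-by-slot greedy loop with a closed-form construction (excess // 5 sixes,
-- one remainder die, ones for the rest); same return value on every input (simpler decomposition).

-- ===== PORT A =====
def solution (A : List Int) (F : Int) (M : Int) : List Int :=
  let numKnownRolls : Int := A.length
  let sumKnownRolls : Int := A.sum
  let totalRolls : Int := numKnownRolls + F
  let requiredSum : Int := totalRolls * M - sumKnownRolls
  if requiredSum < F ∨ requiredSum > 6 * F then [0]
  else
    -- for _ in range(F): greedy append; loop state = (missing_rolls, remaining_sum)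
    let st := (PySem.List.pyRange 0 F 1).foldl
      (fun (st : List Int × Int) (_ : Int) =>
        let roll := min 6 (st.2 - (F - (st.1.length : Int) - 1))
        (st.1 ++ [roll], st.2 - roll))
      ([], requiredSum)
    st.1

-- ===== PORT B =====
def solution_alt (A : List Int) (F : Int) (M : Int) : List Int :=
  let requiredSum : Int := ((A.length : Int) + F) * M - A.sum
  if requiredSum < F ∨ requiredSum > 6 * F then [0]
  else
    let excess := requiredSum - F
    let full := PySem.Int.floordiv excess 5
    let rem := PySem.Int.mod excess 5
    let out := List.replicate full.toNat (6 : Int)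
    let out := if rem ≠ 0 then out ++ [1 + rem] else out
    out ++ List.replicate ((F - (out.length : Int)).toNat) (1 : Int)

-- ===== PRECONDITION & SPEC =====
def Spec_solution (A : List Int) (F : Int) (M : Int) (out : List Int) : Prop := out = solution_alt A F M
instance (A : List Int) (F : Int) (M : Int) (out : List Int) : Decidable (Spec_solution A F M out) := by unfold Spec_solution; infer_instance

-- ===== CLAIM (what is proved, stated in full; the proofs are below) =====
def Claim_equal_solution : Prop := ∀ (A : List Int) (F : Int) (M : Int), Dom_solution A F M → Spec_solution A F M (solution A F M)

-- ===== LEMMAS AND PROOFS =====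

-- A's loop, as a recursion on the number of remaining iterations; `slots` = F minus the current accumulator length
def pvGreedy (n : Nat) (slots : Int) (s : Int) : List Int :=
  match n with
  | 0 => []
  | n + 1 =>
    let roll := min 6 (s - (slots - 1))
    roll :: pvGreedy n (slots - 1) (s - roll)

-- B's closed form, parametrised by slot count n and required sum s
def pvClosed (n : Nat) (s : Int) : List Int :=
  let full := PySem.Int.floordiv (s - n) 5
  let rem := PySem.Int.mod (s - n) 5
  let out := List.replicate full.toNat (6 : Int)
  let out := if rem ≠ 0 then out ++ [1 + rem] else out
  out ++ List.replicate ((n : Int) - (out.length : Int)).toNat (1 : Int)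

theorem pvFoldl_eq_greedy (F : Int) (l : List Int) :
    ∀ (acc : List Int) (s : Int),
      ((l.foldl (fun (st : List Int × Int) (_ : Int) =>
          let roll := min 6 (st.2 - (F - (st.1.length : Int) - 1))
          (st.1 ++ [roll], st.2 - roll)) (acc, s)).1)
        = acc ++ pvGreedy l.length (F - (acc.length : Int)) s := by
  induction l with
  | nil => intro acc s; simp [pvGreedy]
  | cons x xs ih =>
    intro acc s
    simp only [List.foldl_cons, List.length_cons]
    rw [ih]
    simp only [pvGreedy, List.length_append, List.length_singleton, List.append_assoc,
      List.cons_append, List.nil_append]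
    push_cast
    ring_nf

theorem pvGreedy_closed (n : Nat) : ∀ (s : Int), (n : Int) ≤ s → s ≤ 6 * n →
    pvGreedy n n s = pvClosed n s := by
  induction n with
  | zero =>
    intro s h1 h2
    have : s = 0 := by omega
    subst this
    decide
  | succ n ih =>
    intro s h1 h2
    have h5 : (0:Int) < 5 := by decide
    unfold pvClosed
    simp only [PySem.Int.floordiv_eq_ediv_of_pos h5, PySem.Int.mod_eq_emod_of_pos h5]
    have he : (0:Int) ≤ s - (n+1:Nat) := by push_cast at h1 ⊢; omega
    rw [pvGreedy]
    have hcast : ((n+1:Nat):Int) - 1 = (n:Int) := by push_cast; ring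
    rw [hcast]
    by_cases hbig : 5 ≤ s - (n+1:Nat)
    · have hroll : min (6:Int) (s - (n:Int)) = 6 := by push_cast at hbig ⊢; omega
      rw [hroll, ih (s - 6) (by push_cast at h1 hbig ⊢; omega) (by push_cast at h2 ⊢; omega)]
      unfold pvClosed
      simp only [PySem.Int.floordiv_eq_ediv_of_pos h5, PySem.Int.mod_eq_emod_of_pos h5]
      have e1 : s - 6 - (n:Int) = (s - (n+1:Nat)) - 5 := by push_cast; ring
      rw [e1]
      set e : Int := s - (n+1:Nat) with hedef
      have hdiv : e / 5 = (e - 5) / 5 + 1 := by omega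
      have hmod : e % 5 = (e - 5) % 5 := by omega
      rw [hmod, hdiv]
      have htn : ((e - 5) / 5 + 1).toNat = ((e - 5) / 5).toNat + 1 := by omega
      rw [htn]
      by_cases hr : (e - 5) % 5 = 0 <;>
        simp only [hr, ne_eq, not_true_eq_false, not_false_eq_true, if_true, if_false,
          List.replicate_succ, List.cons_append, List.length_append, List.length_replicate,
          List.length_cons, List.length_nil] <;>
        · congr 3
          omega
    · have hroll : min (6:Int) (s - (n:Int)) = s - (n:Int) := by push_cast at hbig he ⊢; omega
      rw [hroll]
      have hrec : s - (s - (n:Int)) = (n:Int) := by ring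
      rw [hrec, ih (n:Int) (by omega) (by omega)]
      unfold pvClosed
      simp only [PySem.Int.floordiv_eq_ediv_of_pos h5, PySem.Int.mod_eq_emod_of_pos h5]
      have e0 : (n:Int) - (n:Int) = 0 := by ring
      rw [e0]
      set e : Int := s - (n+1:Nat) with hedef
      have hee : 0 ≤ e ∧ e < 5 := by omega
      have hdiv : e / 5 = 0 := by omega
      have hmod : e % 5 = e := by omega
      rw [hdiv, hmod]
      by_cases hr : e = 0
      · have hv : s - (n:Int) = 1 := by push_cast at hedef ⊢; omega
        rw [hv]
        simp only [hr, ne_eq, not_true_eq_false, if_false, Int.zero_ediv, Int.zero_emod,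
          Int.toNat_zero, List.replicate_zero, List.nil_append, List.length_nil,
          Int.natCast_zero, sub_zero]
        rw [show ((n:Nat):Int).toNat = n by omega, show (((n+1:Nat)):Int).toNat = n + 1 by omega,
          List.replicate_succ]
      · have hv : s - (n:Int) = 1 + e := by push_cast [hedef]; ring
        rw [hv]
        simp only [hr, ne_eq, not_false_eq_true, if_true, Int.zero_ediv, Int.zero_emod,
          not_true_eq_false, if_false,
          Int.toNat_zero, List.replicate_zero, List.nil_append, List.length_nil, List.length_cons,
          List.cons_append]
        congr 2
        omega

-- ===== VERDICT (by name: the statement is the Claim_ definition above) =====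
theorem solution_spec : Claim_equal_solution := by
  intro A F M _
  unfold Spec_solution solution solution_alt
  simp only []
  set requiredSum : Int := ((A.length : Int) + F) * M - A.sum with hreq
  by_cases hg : requiredSum < F ∨ requiredSum > 6 * F
  · simp [hg]
  · simp only [hg, if_false]
    push_neg at hg
    have hF : 0 ≤ F := by omega
    have hlen : (PySem.List.pyRange 0 F 1).length = F.toNat := by
      rw [PySem.List.length_pyRange_one]; omega
    rw [pvFoldl_eq_greedy F _ [] requiredSum]
    rw [hlen]
    simp only [List.length_nil, Int.natCast_zero, sub_zero, List.nil_append]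
    rw [show F = ((F.toNat : Nat) : Int) by omega]
    simp only [Int.toNat_natCast]
    rw [pvGreedy_closed F.toNat requiredSum (by omega) (by omega)]
    unfold pvClosed
    rfl
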